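-- pv_equiv track=rewrite | github.com/Toveee/CoqIEEE754Validation | core.py | is_nan
-- ===== SOURCE A (Python) =====
-- def is_nan(bin: str, format):
--     n = int(bin, 16)
--     match format:
--         case "b32":
--             e = f'{n:032b}'[1:9]
--
--         case "b64":
--             e = f'{n:064b}'[1:12]
--         case _:
--             raise ValueError(f"Unknown format: {format}")
--     for bit in e:
--         if bit != "1":
--             return False
--
--     return True
-- ===== SOURCE B (Python) =====
-- def is_nan(bin: str, format):
--     n = int(bin, 16)
--     match format:
--         case "b32":
--             shift, mask = 23, 0xFF
--         case "b64":
--             shift, mask = 52, 0x7FF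
--         case _:
--             raise ValueError(f"Unknown format: {format}")
--     return (n >> shift) & mask == mask
-- ===== Notes on version B (the rewrite author's own statement) =====
-- stated objective: simpler
-- what changed: B tests the exponent field with a fixed shift-and-mask on the parsed integer instead of rendering a zero-padded binary string, slicing it and looping over characters; Pre_ excludes malformed/negative hex literals and unknown formats (ValueError in A) and bit patterns wider than the chosen format (32/64 bits), where the position of A's string slice is an artefact of the f-string padding expanding.
-- outside the precondition, e.g. on is_nan('1ff000000', 'b32'): A returns True, B returns False; on is_nan('-1f', 'b32'): A returns False, B returns True
import Mathlib
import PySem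

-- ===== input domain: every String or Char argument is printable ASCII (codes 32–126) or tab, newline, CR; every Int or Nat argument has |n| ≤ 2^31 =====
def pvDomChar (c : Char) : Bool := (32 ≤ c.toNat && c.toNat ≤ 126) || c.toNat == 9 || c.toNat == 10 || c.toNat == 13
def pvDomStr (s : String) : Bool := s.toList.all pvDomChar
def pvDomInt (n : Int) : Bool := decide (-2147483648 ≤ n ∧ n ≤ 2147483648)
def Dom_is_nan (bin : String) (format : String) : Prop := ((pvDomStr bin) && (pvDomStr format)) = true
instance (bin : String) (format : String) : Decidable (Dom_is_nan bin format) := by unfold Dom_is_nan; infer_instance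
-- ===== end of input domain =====

-- B tests the exponent field with a fixed shift-and-mask on the parsed integer instead of A's
-- zero-padded-binary-string render, slice and character loop (objective: simpler); equality
-- is about the return value, neither version mutates anything.

-- ===== PORT A =====
-- shared model of the builtin int(s, 16) for NONNEGATIVE literals (PySem has no base-16 parse):
-- exact for strings of Dom characters: strips ' '/tab/LF/CR, allows one '+', an optional
-- '0x'/'0X' prefix (then an optional single leading '_'), and single '_' separators between
-- hex digits; returns none exactly where Python raises ValueError or the literal is negative
-- (negative literals are outside Pre_ below).
def hexVal? (c : Char) : Option Nat :=
  if '0' ≤ c ∧ c ≤ '9' then some (c.toNat - 48)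
  else if 'a' ≤ c ∧ c ≤ 'f' then some (c.toNat - 87)
  else if 'A' ≤ c ∧ c ≤ 'F' then some (c.toNat - 55)
  else none

def hexDigits? (acc : Nat) : List Char → Option Nat
  | [] => some acc
  | c :: rest =>
    if c = '_' then
      match rest with
      | [] => none
      | d :: rest' =>
        match hexVal? d with
        | some v => hexDigits? (16 * acc + v) rest'
        | none => none
    else
      match hexVal? c with
      | some v => hexDigits? (16 * acc + v) rest
      | none => none

def hexBody? : List Char → Option Nat
  | [] => none
  | c :: rest =>
    match hexVal? c with
    | some v => hexDigits? v rest
    | none => none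

def isPyWS (c : Char) : Bool := c == ' ' || c == '\t' || c == '\n' || c == '\r'

-- strip / optional '+' / optional '0x'-'0X' prefix (then one optional '_'): the list of
-- characters that must form the hex-digit body of the literal
def hexCore (s : String) : List Char :=
  let l := (s.toList.dropWhile isPyWS).reverse.dropWhile isPyWS |>.reverse
  let l := match l with
           | '+' :: rest => rest
           | l => l
  match l with
  | '0' :: x :: rest =>
    if x = 'x' ∨ x = 'X' then
      match rest with
      | '_' :: rest' => rest'
      | _ => rest
    else l
  | _ => l

def pyIntHex? (s : String) : Option Nat := hexBody? (hexCore s)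

def bitLen (n : Nat) : Nat := if n = 0 then 0 else Nat.log2 n + 1

-- f'{n:0Wb}' for n ≥ 0: binary digits, zero-padded to width W; its i-th character is the
-- bit at position L-1-i where L = max W n.bit_length() (exact rendering of the builtin format).
def fmtBinPad (n W : Nat) : List Char :=
  let L := max W (bitLen n)
  (List.range L).map (fun i => if n.testBit (L - 1 - i) then '1' else '0')

def is_nan (bin : String) (format : String) : Bool :=
  match pyIntHex? bin with
  | none => false   -- Python raises ValueError here (outside Pre_)
  | some n =>
    if format = "b32" then
      ((((fmtBinPad n 32).drop 1).take 8).all (fun bit => bit == '1'))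
    else if format = "b64" then
      ((((fmtBinPad n 64).drop 1).take 11).all (fun bit => bit == '1'))
    else false      -- Python raises ValueError here (outside Pre_)

-- ===== PORT B =====
-- B-side model of int(s, 16) (same stripping/shape, fold-based evaluation of the digits)
def hexDig (c : Char) : Bool := (hexVal? c).isSome

-- no two consecutive underscores
def pairsOk : List Char → Bool
  | a :: b :: t => (!(a == '_') || !(b == '_')) && pairsOk (b :: t)
  | _ => true

-- Boolean form of a well-formed nonnegative literal body: first char a hex digit, then hex
-- digits with single '_' separators and no trailing '_'
def hexShapeOk (l : List Char) : Bool :=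
  l.head?.any hexDig && l.all (fun c => hexDig c || c == '_') &&
  pairsOk l && !(l.getLast? == some '_')

def hexLit? (s : String) : Option Nat :=
  let ds := hexCore s
  if hexShapeOk ds then
    some ((ds.filter (fun c => !(c == '_'))).foldl (fun a c => 16 * a + (hexVal? c).getD 0) 0)
  else none

def is_nan_alt (bin : String) (format : String) : Bool :=
  match hexLit? bin with
  | none => false   -- raise (outside Pre_)
  | some n =>
    match (if format = "b32" then some ((23 : Nat), (255 : Nat))
           else if format = "b64" then some (52, 2047) else none) with
    | none => false -- raise (outside Pre_)
    | some (shift, mask) => ((n >>> shift) &&& mask) == mask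

-- ===== PRECONDITION & SPEC =====
-- the number of significant hex digits of the literal (underscores and leading zeros dropped)
def sigLen (bin : String) : Nat :=
  (((hexCore bin).filter (fun c => !(c == '_'))).dropWhile (fun c => c == '0')).length

-- Pre_ excludes strings that are not a well-formed hex literal and formats other than
-- "b32"/"b64" (both ValueError in A), negative literals (outside the natural domain: an
-- IEEE-754 bit pattern is a nonnegative hex string), and literals wider than the format
-- (more than 8/16 significant hex digits), where the position of A's string slice is an
-- artefact of the f-string padding expanding beyond the format width.
def Pre_is_nan (bin : String) (format : String) : Prop :=
  hexShapeOk (hexCore bin) = true ∧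
  ((format = "b32" ∧ sigLen bin ≤ 8) ∨ (format = "b64" ∧ sigLen bin ≤ 16))
instance (bin : String) (format : String) : Decidable (Pre_is_nan bin format) := by
  unfold Pre_is_nan; infer_instance

def pvWitness_is_nan : String × String := ("7fc00000", "b32")

def Spec_is_nan (bin : String) (format : String) (out : Bool) : Prop := out = is_nan_alt bin format
instance (bin : String) (format : String) (out : Bool) : Decidable (Spec_is_nan bin format out) := by
  unfold Spec_is_nan; infer_instance

-- ===== CLAIM (what is proved, stated in full; the proofs are below) =====
def Claim_equal_is_nan : Prop := ∀ (bin : String) (format : String), Dom_is_nan bin format → Pre_is_nan bin format → Spec_is_nan bin format (is_nan bin format)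

-- ===== LEMMAS AND PROOFS =====

-- closed-form shape of a valid digit sequence after the first digit
def TailOk (l : List Char) : Prop :=
  (∀ c ∈ l, hexDig c = true ∨ c = '_') ∧
  List.IsChain (fun a b => a = '_' → b ≠ '_') l ∧
  l.getLast? ≠ some '_'

lemma hexDig_ne_underscore {c : Char} (hc : hexDig c = true) : c ≠ '_' := by
  intro h; subst h; exact absurd hc (by decide)

lemma tailOk_cons {c : Char} {l : List Char} (hc : hexDig c = true) :
    TailOk (c :: l) ↔ TailOk l := by
  have hne := hexDig_ne_underscore hc
  cases l with
  | nil => simp [TailOk, hc, hne]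
  | cons b t =>
    simp only [TailOk, List.mem_cons, List.isChain_cons_cons, List.getLast?_cons_cons]
    constructor
    · rintro ⟨h1, ⟨_, h2⟩, h3⟩
      exact ⟨fun x hx => h1 x (Or.inr hx), h2, h3⟩
    · rintro ⟨h1, h2, h3⟩
      exact ⟨fun x hx => by rcases hx with rfl | hx; exact Or.inl hc; exact h1 x hx,
        ⟨fun h => absurd h hne, h2⟩, h3⟩

lemma tailOk_underscore {c : Char} {l : List Char} (hc : hexDig c = true) :
    TailOk ('_' :: c :: l) ↔ TailOk l := by
  have hne := hexDig_ne_underscore hc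
  rw [show TailOk l ↔ TailOk (c :: l) from (tailOk_cons hc).symm]
  simp only [TailOk, List.mem_cons, List.isChain_cons_cons, List.getLast?_cons_cons]
  constructor
  · rintro ⟨h1, ⟨_, h2⟩, h3⟩
    refine ⟨fun x hx => ?_, h2, h3⟩
    rcases hx with rfl | hx
    · exact Or.inl hc
    · exact h1 x (Or.inr (Or.inr hx))
  · rintro ⟨h1, h2, h3⟩
    refine ⟨fun x hx => ?_, ⟨fun _ => hne, h2⟩, h3⟩
    rcases hx with rfl | hx
    · exact Or.inr rfl
    · exact h1 x hx

lemma beq_underscore_false {c : Char} (hc : hexDig c = true) : (c == '_') = false := by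
  simpa using hexDig_ne_underscore hc

-- recursive parse = fold over the underscore-free digits, on well-shaped tails
lemma digits_eq_fold (acc : Nat) (l : List Char) :
    TailOk l →
    hexDigits? acc l
      = some ((l.filter (fun c => !(c == '_'))).foldl (fun a c => 16 * a + (hexVal? c).getD 0) acc) := by
  fun_induction hexDigits? acc l
  case case1 => intro _; simp
  case case2 => intro h; exact absurd h (by simp [TailOk])
  case case3 acc d rest' v hv ih =>
    intro h
    have hd : hexDig d = true := by simp [hexDig, hv]
    rw [ih ((tailOk_underscore hd).mp h)]
    simp [beq_underscore_false hd, hv]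
  case case4 acc d rest' hv =>
    intro h
    exfalso
    obtain ⟨h1, h2, _⟩ := h
    rcases h1 d (by simp) with hd | rfl
    · simp [hexDig, hv] at hd
    · rw [List.isChain_cons_cons] at h2; exact h2.1 rfl rfl
  case case5 acc c rest hc v hv ih =>
    intro h
    have hcd : hexDig c = true := by simp [hexDig, hv]
    rw [ih ((tailOk_cons hcd).mp h)]
    simp [beq_underscore_false hcd, hv]
  case case6 acc c rest hc hv =>
    intro h
    exfalso
    obtain ⟨h1, _, _⟩ := h
    rcases h1 c (by simp) with hd | hd
    · simp [hexDig, hv] at hd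
    · exact hc hd

lemma pairsOk_iff (l : List Char) :
    pairsOk l = true ↔ List.IsChain (fun a b => a = '_' → b ≠ '_') l := by
  fun_induction pairsOk l with
  | case1 a b t ih =>
    have h1 : (!(a == '_') || !(b == '_')) = true ↔ (a = '_' → b ≠ '_') := by
      by_cases ha : a = '_' <;> by_cases hb : b = '_' <;> simp [ha, hb]
    rw [List.isChain_cons_cons, ← ih, Bool.and_eq_true, h1]
  | case2 l h =>
    cases l with
    | nil => exact ⟨fun _ => by simp, fun _ => rfl⟩
    | cons c t =>
      cases t with
      | nil => exact ⟨fun _ => by simp, fun _ => rfl⟩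
      | cons d t' => exact absurd rfl (h c d t')

lemma hexShapeOk_iff (l : List Char) :
    hexShapeOk l = true ↔ (l.head?.any hexDig = true ∧ TailOk l) := by
  unfold hexShapeOk TailOk
  simp only [Bool.and_eq_true, List.all_eq_true, Bool.or_eq_true, beq_iff_eq, pairsOk_iff,
    Bool.not_eq_eq_eq_not, Bool.not_true, beq_eq_false_iff_ne, ne_eq]
  tauto

-- the two models of int(s, 16) agree on well-shaped literals
lemma body_eq_fold (l : List Char) (h : hexShapeOk l = true) :
    hexBody? l
      = some ((l.filter (fun c => !(c == '_'))).foldl (fun a c => 16 * a + (hexVal? c).getD 0) 0) := by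
  obtain ⟨hh, ht⟩ := (hexShapeOk_iff l).mp h
  cases l with
  | nil => simp at hh
  | cons c rest =>
    simp only [List.head?_cons, Option.any_some] at hh
    obtain ⟨v, hv⟩ : ∃ v, hexVal? c = some v := Option.isSome_iff_exists.mp hh
    rw [hexBody?, hv]
    dsimp only
    rw [digits_eq_fold v rest ((tailOk_cons hh).mp ht)]
    simp [beq_underscore_false hh, hv]

-- ---- value bound from the significant-digit count ----
lemma hexVal_lt {c : Char} {v : Nat} (h : hexVal? c = some v) : v < 16 := by
  unfold hexVal? at h
  split_ifs at h with h1 h2 h3 <;> simp only [Option.some.injEq] at h <;> subst h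
  · have hr := h1.2; rw [Char.le_def, UInt32.le_iff_toNat_le] at hr
    have hr' : c.toNat ≤ 57 := hr; omega
  · have hr := h2.2; rw [Char.le_def, UInt32.le_iff_toNat_le] at hr
    have hr' : c.toNat ≤ 102 := hr; omega
  · have hr := h3.2; rw [Char.le_def, UInt32.le_iff_toNat_le] at hr
    have hr' : c.toNat ≤ 70 := hr; omega

lemma fold_lt (l : List Char) (hl : ∀ c ∈ l, hexDig c = true) (acc : Nat) :
    l.foldl (fun a c => 16 * a + (hexVal? c).getD 0) acc < (acc + 1) * 16 ^ l.length := by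
  induction l generalizing acc with
  | nil => simp
  | cons c t ih =>
    obtain ⟨v, hv⟩ : ∃ v, hexVal? c = some v :=
      Option.isSome_iff_exists.mp (hl c (by simp))
    have hv16 := hexVal_lt hv
    have h1 := ih (fun x hx => hl x (by simp [hx])) (16 * acc + v)
    simp only [List.foldl_cons, hv, Option.getD_some, List.length_cons]
    calc List.foldl (fun a c => 16 * a + (hexVal? c).getD 0) (16 * acc + v) t
        < (16 * acc + v + 1) * 16 ^ t.length := h1
      _ ≤ (acc + 1) * 16 ^ (t.length + 1) := by
          rw [pow_succ]
          nlinarith [pow_pos (show (0:Nat) < 16 by norm_num) t.length]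

lemma fold_drop_zeros (l : List Char) :
    (l.dropWhile (fun c => c == '0')).foldl (fun a c => 16 * a + (hexVal? c).getD 0) 0
      = l.foldl (fun a c => 16 * a + (hexVal? c).getD 0) 0 := by
  induction l with
  | nil => rfl
  | cons c t ih =>
    by_cases hc : c = '0'
    · subst hc
      simpa [List.dropWhile_cons, hexVal?] using ih
    · have hb : (c == '0') = false := by simpa using hc
      simp [hb]

lemma fold_bound (l : List Char) (hl : ∀ c ∈ l, hexDig c = true) (k : Nat)
    (hk : (l.dropWhile (fun c => c == '0')).length ≤ k) :
    l.foldl (fun a c => 16 * a + (hexVal? c).getD 0) 0 < 2 ^ (4 * k) := by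
  rw [← fold_drop_zeros]
  have hsub : ∀ c ∈ l.dropWhile (fun c => c == '0'), hexDig c = true :=
    fun c hc => hl c ((List.dropWhile_sublist _).subset hc)
  have h1 := fold_lt _ hsub 0
  have h2 : (16:Nat) ^ (l.dropWhile (fun c => c == '0')).length ≤ 2 ^ (4 * k) := by
    rw [show (16:Nat) = 2 ^ 4 by norm_num, ← pow_mul]
    exact pow_le_pow_right₀ (by norm_num) (by omega)
  simp only [Nat.zero_add, one_mul] at h1
  exact lt_of_lt_of_le h1 h2

lemma bitLen_le {n w : Nat} (h : n < 2 ^ w) : bitLen n ≤ w := by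
  unfold bitLen
  split_ifs with h0
  · omega
  · have := (Nat.log2_lt h0).mpr h
    omega

-- ---- A's string scan as a bit condition ----
lemma take_drop_range (L m : Nat) (h : m + 1 ≤ L) :
    ((List.range L).drop 1).take m = List.range' 1 m := by
  apply List.ext_getElem
  · simp; omega
  · intro i h1 h2
    simp

lemma all_ones_iff (n L m : Nat) (h : m + 1 ≤ L)
    (f : Nat → Char) (hf : f = fun i => if n.testBit (L - 1 - i) then '1' else '0') :
    ((((List.range L).map f).drop 1).take m).all (fun bit => bit == '1')
      = decide (∀ i, i < m → n.testBit (L - 2 - i) = true) := by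
  rw [← List.map_drop, ← List.map_take, take_drop_range L m h]
  rcases Bool.eq_false_or_eq_true (decide (∀ i, i < m → n.testBit (L - 2 - i) = true)) with hd | hd
  · rw [hd]
    rw [List.all_eq_true]
    simp only [decide_eq_true_eq] at hd
    intro x hx
    simp only [List.mem_map, List.mem_range'] at hx
    obtain ⟨j, ⟨hj1, hj2⟩, rfl⟩ := hx
    subst hf; simp only []
    have hb := hd (j - 1) (by omega)
    have : L - 1 - j = L - 2 - (j - 1) := by omega
    rw [this, hb]; simp
  · rw [hd]
    rw [List.all_eq_false]
    simp only [decide_eq_false_iff_not, not_forall] at hd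
    obtain ⟨i, hi, hb⟩ := hd
    refine ⟨f (1 + i), ?_, ?_⟩
    · exact List.mem_map_of_mem (by simp [List.mem_range']; omega)
    · subst hf; simp only []
      have : L - 1 - (1 + i) = L - 2 - i := by omega
      rw [this]
      simp [hb]

lemma mod_pow_eq_sub_one_iff (x m : Nat) :
    (x % 2 ^ m = 2 ^ m - 1) ↔ (∀ i, i < m → x.testBit i = true) := by
  constructor
  · intro h i hi
    have h1 : (x % 2 ^ m).testBit i = x.testBit i := by
      simp [Nat.testBit_mod_two_pow, hi]
    rw [← h1, h, Nat.testBit_two_pow_sub_one]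
    simp [hi]
  · intro h
    apply Nat.eq_of_testBit_eq
    intro i
    rw [Nat.testBit_mod_two_pow, Nat.testBit_two_pow_sub_one]
    by_cases hi : i < m
    · simp [hi, h i hi]
    · simp [hi]

lemma mask_eq_iff (n k m : Nat) :
    (((n >>> k) &&& ((1 <<< m) - 1)) == ((1 <<< m) - 1))
      = decide (∀ i, i < m → n.testBit (k + i) = true) := by
  have hm : (1 <<< m) = 2 ^ m := by simp [Nat.shiftLeft_eq]
  rw [hm, Nat.and_two_pow_sub_one_eq_mod]
  rcases Bool.eq_false_or_eq_true (decide (∀ i, i < m → n.testBit (k + i) = true)) with hd | hd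
  all_goals rw [hd]
  · simp only [decide_eq_true_eq] at hd
    simp only [beq_iff_eq]
    exact (mod_pow_eq_sub_one_iff (n >>> k) m).mpr
      (fun i hi => by rw [Nat.testBit_shiftRight]; exact hd i hi)
  · simp only [decide_eq_false_iff_not] at hd
    simp only [beq_eq_false_iff_ne, ne_eq]
    intro hc
    apply hd
    intro i hi
    have := (mod_pow_eq_sub_one_iff (n >>> k) m).mp hc i hi
    rwa [Nat.testBit_shiftRight] at this

lemma reindex (n L m : Nat) (h : m + 1 ≤ L) :
    (∀ i, i < m → n.testBit (L - 2 - i) = true) ↔ (∀ i, i < m → n.testBit (L - m - 1 + i) = true) := by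
  constructor
  · intro hh i hi
    have := hh (m - 1 - i) (by omega)
    have e : L - 2 - (m - 1 - i) = L - m - 1 + i := by omega
    rwa [e] at this
  · intro hh i hi
    have := hh (m - 1 - i) (by omega)
    have e : L - m - 1 + (m - 1 - i) = L - 2 - i := by omega
    rwa [e] at this

-- A's scan on a literal fitting in w bits = the fixed shift-and-mask test
lemma core_eq (n w m : Nat) (hw : m + 1 ≤ w) (hn : bitLen n ≤ w) :
    ((((fmtBinPad n w).drop 1).take m).all (fun bit => bit == '1'))
      = (((n >>> (w - m - 1)) &&& ((1 <<< m) - 1)) == ((1 <<< m) - 1)) := by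
  have hmax : max w (bitLen n) = w := max_eq_left hn
  rw [fmtBinPad]
  simp only [hmax]
  rw [all_ones_iff n w m hw _ rfl, mask_eq_iff]
  simp only [decide_eq_decide]
  exact reindex n w m hw

-- ===== VERDICT (by name: the statement is the Claim_ definition above) =====
theorem is_nan_spec : Claim_equal_is_nan := by
  intro bin format _ hpre
  unfold Spec_is_nan is_nan is_nan_alt hexLit? pyIntHex?
  obtain ⟨hshape, hfmt⟩ := hpre
  rw [body_eq_fold _ hshape]
  simp only [hshape, if_true]
  set n := ((hexCore bin).filter (fun c => !(c == '_'))).foldl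
      (fun a c => 16 * a + (hexVal? c).getD 0) 0 with hn
  have hdig : ∀ c ∈ (hexCore bin).filter (fun c => !(c == '_')), hexDig c = true := by
    intro c hc
    obtain ⟨hall, _⟩ := ((hexShapeOk_iff _).mp hshape).2
    rcases hall c (List.mem_of_mem_filter hc) with h | rfl
    · exact h
    · simp at hc
  rcases hfmt with ⟨hf, hlen⟩ | ⟨hf, hlen⟩
  · have hbound : n < 2 ^ 32 := fold_bound _ hdig 8 hlen
    subst hf
    rw [if_pos rfl, if_pos rfl]
    rw [core_eq n 32 8 (by omega) (bitLen_le hbound)]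
    norm_num [Nat.shiftLeft_eq]
  · have hbound : n < 2 ^ 64 := fold_bound _ hdig 16 hlen
    subst hf
    rw [if_neg (by decide), if_pos rfl, if_neg (by decide), if_pos rfl]
    rw [core_eq n 64 11 (by omega) (bitLen_le hbound)]
    norm_num [Nat.shiftLeft_eq]
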